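-- pv_equiv track=rewrite | github.com/dlebed/secure-constants | secure_constants.py | check_for_complements
-- ===== SOURCE A (Python) =====
-- from typing import List, Tuple, Optional, Union
--
-- def check_for_complements(constants: List[int], bit_width: int) -> List[Tuple[int, int]]:
--     """
--     Check if any constants are bitwise complements of each other.
--
--     This is a security vulnerability because a single stuck-at fault affecting
--     all bits (e.g., voltage glitch on bus) can transform A into ~A.
--
--     Args:
--         constants: List of constants
--         bit_width: Bit width of constants
--
--     Returns:
--         List of (index_i, index_j) pairs where constants[i] == ~constants[j]
--     """
--     complement_pairs = []
--     max_val = (1 << bit_width) - 1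
--
--     for i in range(len(constants)):
--         for j in range(i + 1, len(constants)):
--             # Calculate bitwise complement within bit_width
--             complement_i = constants[i] ^ max_val
--
--             if complement_i == constants[j]:
--                 complement_pairs.append((i, j))
--
--     return complement_pairs
-- ===== SOURCE B (Python) =====
-- def check_for_complements(constants, bit_width):
--     max_val = (1 << bit_width) - 1
--     index_of = {}
--     for i, v in enumerate(constants):
--         index_of.setdefault(v, []).append(i)
--     pairs = []
--     for i, v in enumerate(constants):
--         for j in index_of.get(v ^ max_val, []):
--             if i < j:
--                 pairs.append((i, j))
--     return pairs
-- ===== Notes on version B (the rewrite author's own statement) =====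
-- stated objective: faster
-- what changed: replaces the quadratic all-pairs scan by a one-pass hash map from value to its (sorted) index list, then one complement lookup per element, keeping A's exact pair order
import Mathlib
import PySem

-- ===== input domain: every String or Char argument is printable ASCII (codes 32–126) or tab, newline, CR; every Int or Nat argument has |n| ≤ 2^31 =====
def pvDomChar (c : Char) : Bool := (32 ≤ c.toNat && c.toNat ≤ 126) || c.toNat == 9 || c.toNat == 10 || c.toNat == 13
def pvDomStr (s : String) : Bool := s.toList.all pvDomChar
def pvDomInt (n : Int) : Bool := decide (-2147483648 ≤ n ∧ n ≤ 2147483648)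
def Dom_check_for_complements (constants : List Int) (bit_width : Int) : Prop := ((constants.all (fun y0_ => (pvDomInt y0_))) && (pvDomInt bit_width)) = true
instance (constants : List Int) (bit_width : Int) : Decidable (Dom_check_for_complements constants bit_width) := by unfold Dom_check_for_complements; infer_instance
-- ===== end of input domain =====

-- B replaces A's quadratic all-pairs scan by a hash map value → sorted index list plus one
-- complement lookup per element, keeping A's exact pair order (objective: faster, asymptotic).

-- ===== PORT A =====
def check_for_complements (constants : List Int) (bit_width : Int) : List (Int × Int) :=
  let max_val : Int := ((1 : Int) <<< bit_width.toNat) - 1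
  (PySem.List.pyRange 0 (PySem.List.len constants)).foldl (fun complement_pairs i =>
    (PySem.List.pyRange (i + 1) (PySem.List.len constants)).foldl (fun complement_pairs j =>
      if PySem.Int.bxor (PySem.List.pyGetD constants i 0) max_val == PySem.List.pyGetD constants j 0
      then complement_pairs ++ [(i, j)] else complement_pairs) complement_pairs) []

-- ===== PORT B =====
def check_for_complements_alt (constants : List Int) (bit_width : Int) : List (Int × Int) :=
  let max_val : Int := ((1 : Int) <<< bit_width.toNat) - 1
  let index_of := (PySem.List.enumerate constants).foldl
      (fun d p => d.insert p.2 (d.getD p.2 [] ++ [p.1])) (PySem.Dict.empty (κ := Int) (ν := List Int))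
  (PySem.List.enumerate constants).foldl (fun pairs p =>
    (index_of.getD (PySem.Int.bxor p.2 max_val) []).foldl
      (fun pairs j => if p.1 < j then pairs ++ [(p.1, j)] else pairs) pairs) []

-- ===== PRECONDITION & SPEC =====
-- Python's `1 << bit_width` raises ValueError for negative bit_width (in A and in B alike).
def Pre_check_for_complements (constants : List Int) (bit_width : Int) : Prop := 0 ≤ bit_width
instance (constants : List Int) (bit_width : Int) : Decidable (Pre_check_for_complements constants bit_width) := by unfold Pre_check_for_complements; infer_instance
def pvWitness_check_for_complements : List Int × Int := ([5, 2, 5], 3)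

def Spec_check_for_complements (constants : List Int) (bit_width : Int) (out : List (Int × Int)) : Prop := out = check_for_complements_alt constants bit_width
instance (constants : List Int) (bit_width : Int) (out : List (Int × Int)) : Decidable (Spec_check_for_complements constants bit_width out) := by unfold Spec_check_for_complements; infer_instance

-- ===== CLAIM (what is proved, stated in full; the proofs are below) =====
def Claim_equal_check_for_complements : Prop := ∀ (constants : List Int) (bit_width : Int), Dom_check_for_complements constants bit_width → Pre_check_for_complements constants bit_width → Spec_check_for_complements constants bit_width (check_for_complements constants bit_width)

-- ===== LEMMAS AND PROOFS =====

-- The index dictionary built by B maps each value v to the indices at which v occurs, in order.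
lemma buildIdx_getD (ps : List (Int × Int)) (d : PySem.Dict Int (List Int)) (v : Int) :
    (ps.foldl (fun d p => d.insert p.2 (d.getD p.2 [] ++ [p.1])) d).getD v []
      = d.getD v [] ++ (ps.filter (fun p => p.2 == v)).map (·.1) := by
  induction ps generalizing d with
  | nil => simp
  | cons p ps ih =>
    simp only [List.foldl_cons, List.filter_cons, ih, PySem.Dict.getD_insert]
    rcases eq_or_ne v p.2 with h | h
    · subst h; simp [List.append_assoc]
    · simp [h, Ne.symm h]

-- Filtering `i < ·` out of range(0, n) is the same as ranging over (i+1, n).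
lemma filter_range_gt (n i : Int) (q : Int → Bool) (h0 : 0 ≤ i) :
    (PySem.List.pyRange 0 n).filter (fun j => decide (i < j) && q j)
      = (PySem.List.pyRange (i + 1) n).filter q := by
  by_cases hn : i + 1 ≤ n
  · rw [PySem.List.pyRange_one_append 0 (i + 1) n (by omega) hn, List.filter_append]
    have h1 : (PySem.List.pyRange 0 (i + 1)).filter (fun j => decide (i < j) && q j) = [] := by
      refine List.filter_eq_nil_iff.mpr (fun j hj => ?_)
      have := PySem.List.mem_pyRange_one.mp hj
      simp [show ¬ (i < j) by omega]
    have h2 : (PySem.List.pyRange (i + 1) n).filter (fun j => decide (i < j) && q j)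
        = (PySem.List.pyRange (i + 1) n).filter q := by
      refine List.filter_congr (fun j hj => ?_)
      have := PySem.List.mem_pyRange_one.mp hj
      simp [show i < j by omega]
    rw [h1, h2, List.nil_append]
  · rw [PySem.List.pyRange_one_eq_nil (a := i + 1) (b := n) (by omega)]
    refine List.filter_eq_nil_iff.mpr (fun j hj => ?_)
    have := PySem.List.mem_pyRange_one.mp hj
    simp [show ¬ (i < j) by omega]

-- For an in-range i, A's inner scan over j > i equals B's lookup-then-filter block.
lemma inner_blocks_eq (constants : List Int) (m i : Int) (h0 : 0 ≤ i) :
    ((PySem.List.pyRange (i + 1) (PySem.List.len constants)).filter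
        (fun j => PySem.Int.bxor (PySem.List.pyGetD constants i 0) m == PySem.List.pyGetD constants j 0)).map
      (fun j => (i, j))
    = (((((PySem.List.pyRange 0 (PySem.List.len constants)).map
            (fun j => (j, PySem.List.pyGetD constants j 0))).filter
          (fun p => p.2 == PySem.Int.bxor (PySem.List.pyGetD constants i 0) m)).map
        (fun p => p.1)).filter (fun j => decide (i < j))).map (fun j => (i, j)) := by
  simp only [List.filter_map, List.map_map, Function.comp_def, List.filter_filter]
  rw [filter_range_gt _ i _ h0]
  refine congrArg _ (List.filter_congr (fun j _ => ?_))
  simp [eq_comm]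

theorem check_for_complements_spec : Claim_equal_check_for_complements := by
  intro constants bit_width _ _
  unfold Spec_check_for_complements check_for_complements check_for_complements_alt
  simp only [PySem.List.foldl_append_if, PySem.List.foldl_append_ite,
    PySem.List.foldl_append_eq_flatMap, List.nil_append, buildIdx_getD, PySem.Dict.getD_empty]
  rw [PySem.List.enumerate_eq_map_pyRange constants 0, List.flatMap_map]
  refine List.flatMap_congr (fun i hi => ?_)
  exact inner_blocks_eq constants ((1 : Int) <<< bit_width.toNat - 1) i
    (PySem.List.mem_pyRange_one.mp hi).1
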